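-- pv_equiv track=rewrite | github.com/miya-bee/tategaki-xtc-gui-studio | tests/golden_case_registry.py | validate_threshold_profile_registry
-- ===== SOURCE A (Python) =====
-- from typing import Dict, List
--
-- CASE_PROFILE_PREFIX_RULES = {
--     'glyph_': 'glyph_',
--     'tatechuyoko_': 'tatechuyoko_',
--     'page_': 'page_',
-- }
--
-- def expected_profile_prefix_for_case(case_name: str) -> str:
--     for case_prefix, profile_prefix in CASE_PROFILE_PREFIX_RULES.items():
--         if case_name.startswith(case_prefix):
--             return profile_prefix
--     return ''
--
-- def validate_threshold_profile_registry(case_specs: Dict[str, Dict], threshold_profiles: Dict[str, Dict[str, float]]) -> Dict[str, List[str]]: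
--     referenced = []
--     missing = []
--     mismatched = []
--     for case_name, spec in case_specs.items():
--         profile_name = spec.get('threshold_profile')
--         if not profile_name:
--             continue
--         referenced.append(profile_name)
--         if profile_name not in threshold_profiles:
--             missing.append(case_name)
--             continue
--         expected_prefix = expected_profile_prefix_for_case(case_name)
--         if expected_prefix and not str(profile_name).startswith(expected_prefix):
--             mismatched.append(case_name)
--     unused = sorted(name for name in threshold_profiles if name not in set(referenced))
--     return {
--         'referenced_profiles': sorted(set(referenced)),
--         'missing_profile_cases': sorted(missing),
--         'unused_profiles': unused,
--         'family_mismatch_cases': sorted(mismatched),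
--     }
-- ===== SOURCE B (Python) =====
-- def expected_profile_prefix_for_case(case_name):
--     return next((p for p in ('glyph_', 'tatechuyoko_', 'page_')
--                  if case_name.startswith(p)), '')
--
-- def validate_threshold_profile_registry(case_specs, threshold_profiles):
--     # Inverted index: group the case names by the profile they reference,
--     # then judge each profile once (a group-by join instead of a per-case loop).
--     cases_by_profile = {}
--     for case_name, spec in case_specs.items():
--         profile = spec.get('threshold_profile')
--         if profile:
--             cases_by_profile.setdefault(profile, []).append(case_name)
--     missing = []
--     mismatched = []
--     for profile, cases in cases_by_profile.items():
--         if profile not in threshold_profiles: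
--             missing.extend(cases)
--         else:
--             mismatched.extend(
--                 case for case in cases
--                 if expected_profile_prefix_for_case(case)
--                 and not profile.startswith(expected_profile_prefix_for_case(case)))
--     return {
--         'referenced_profiles': sorted(cases_by_profile),
--         'missing_profile_cases': sorted(missing),
--         'unused_profiles': sorted(p for p in threshold_profiles
--                                   if p not in cases_by_profile),
--         'family_mismatch_cases': sorted(mismatched),
--     }
-- ===== Notes on version B (the rewrite author's own statement) =====
-- stated objective: alternative
-- what changed: A classifies case by case in one accumulating loop; B builds an inverted index (profile -> list of referencing cases) with dict grouping and then judges each distinct profile once, extending missing/mismatched per group and reading referenced/unused straight off the index keys.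
import Mathlib
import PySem

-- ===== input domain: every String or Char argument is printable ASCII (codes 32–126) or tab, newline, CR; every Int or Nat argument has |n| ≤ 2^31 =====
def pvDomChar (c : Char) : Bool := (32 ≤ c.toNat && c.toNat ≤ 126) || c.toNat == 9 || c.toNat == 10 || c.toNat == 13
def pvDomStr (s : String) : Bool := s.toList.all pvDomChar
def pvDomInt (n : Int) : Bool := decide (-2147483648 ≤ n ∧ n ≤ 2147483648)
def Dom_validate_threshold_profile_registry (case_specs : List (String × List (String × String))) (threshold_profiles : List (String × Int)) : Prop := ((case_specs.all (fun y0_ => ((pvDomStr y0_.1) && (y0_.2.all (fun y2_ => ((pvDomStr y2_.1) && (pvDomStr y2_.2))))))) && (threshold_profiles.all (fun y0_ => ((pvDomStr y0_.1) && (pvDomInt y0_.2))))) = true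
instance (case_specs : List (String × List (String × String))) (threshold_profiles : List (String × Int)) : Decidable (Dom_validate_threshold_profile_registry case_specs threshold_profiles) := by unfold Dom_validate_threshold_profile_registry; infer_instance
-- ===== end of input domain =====

-- B replaces A's single per-case accumulating loop by an inverted index (profile -> referencing cases)
-- built by dict grouping, judged once per distinct profile (objective: alternative algorithm, same cost).

-- ===== PORT A =====
-- CASE_PROFILE_PREFIX_RULES, iterated in insertion order by the helper
def pvRulesA : List (String × String) :=
  [("glyph_", "glyph_"), ("tatechuyoko_", "tatechuyoko_"), ("page_", "page_")]

-- the helper's for-loop with early return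
def pvEpLoopA (case_name : String) : List (String × String) → String
  | [] => ""
  | (case_prefix, profile_prefix) :: rest =>
      if PySem.Str.startswith case_name case_prefix then profile_prefix
      else pvEpLoopA case_name rest

def expected_profile_prefix_for_case (case_name : String) : String :=
  pvEpLoopA case_name pvRulesA

-- one iteration of A's for-loop over (referenced, missing, mismatched)
def pvStepA (threshold_profiles : List (String × Int)) (st : List String × List String × List String) (cs : String × List (String × String)) : List String × List String × List String :=
  let case_name := cs.1
  match PySem.Dict.get? (PySem.Dict.mk cs.2) "threshold_profile" with
  | none => st
  | some profile_name =>
    if profile_name = "" then st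
    else
      let referenced := st.1 ++ [profile_name]
      if !(PySem.Dict.contains (PySem.Dict.mk threshold_profiles) profile_name) then
        (referenced, st.2.1 ++ [case_name], st.2.2)
      else
        let expected_prefix := expected_profile_prefix_for_case case_name
        if expected_prefix ≠ "" && !(PySem.Str.startswith profile_name expected_prefix) then
          (referenced, st.2.1, st.2.2 ++ [case_name])
        else (referenced, st.2.1, st.2.2)

def validate_threshold_profile_registry (case_specs : List (String × List (String × String))) (threshold_profiles : List (String × Int)) : List (String × List String) :=
  -- the single for-loop accumulating (referenced, missing, mismatched)
  let st := case_specs.foldl (pvStepA threshold_profiles) ([], [], [])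
  let referenced := st.1
  let refset := PySem.Set.ofList referenced
  let unused := PySem.List.sorted (((PySem.Dict.mk threshold_profiles).keys).filter
      (fun name => !(PySem.Set.contains refset name))) (fun x => x) false
  [("referenced_profiles", PySem.List.sorted (PySem.Set.ofList referenced) (fun x => x) false),
   ("missing_profile_cases", PySem.List.sorted st.2.1 (fun x => x) false),
   ("unused_profiles", unused),
   ("family_mismatch_cases", PySem.List.sorted st.2.2 (fun x => x) false)]

-- ===== PORT B =====
-- B's helper: first matching prefix via next(... for ...), default ''
def pvExpPrefixB (case_name : String) : String :=
  ((["glyph_", "tatechuyoko_", "page_"].find?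
      (fun p => PySem.Str.startswith case_name p)).getD "")

-- grouping loop body: cases_by_profile.setdefault(profile, []).append(case_name) when profile is truthy
def pvGroupStepB (d : PySem.Dict String (List String)) (cs : String × List (String × String)) : PySem.Dict String (List String) :=
  match PySem.Dict.get? (PySem.Dict.mk cs.2) "threshold_profile" with
  | none => d
  | some profile => if profile ≠ "" then d.modify profile [] (fun l => l ++ [cs.1]) else d

-- judging loop body over the index's items: extend missing or mismatched per profile group
def pvJudgeStepB (threshold_profiles : List (String × Int)) (st : List String × List String) (it : String × List String) : List String × List String :=
  if !(PySem.Dict.contains (PySem.Dict.mk threshold_profiles) it.1) then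
    (st.1 ++ it.2, st.2)
  else
    (st.1, st.2 ++ it.2.filter (fun c =>
        pvExpPrefixB c ≠ "" && !(PySem.Str.startswith it.1 (pvExpPrefixB c))))

def validate_threshold_profile_registry_alt (case_specs : List (String × List (String × String))) (threshold_profiles : List (String × Int)) : List (String × List String) :=
  let idx := case_specs.foldl pvGroupStepB PySem.Dict.empty
  let st := idx.items.foldl (pvJudgeStepB threshold_profiles) ([], [])
  [("referenced_profiles", PySem.List.sorted idx.keys (fun x => x) false),
   ("missing_profile_cases", PySem.List.sorted st.1 (fun x => x) false),
   ("unused_profiles", PySem.List.sorted (((PySem.Dict.mk threshold_profiles).keys).filter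
        (fun p => !(idx.contains p))) (fun x => x) false),
   ("family_mismatch_cases", PySem.List.sorted st.2 (fun x => x) false)]

-- ===== PRECONDITION & SPEC =====
def Spec_validate_threshold_profile_registry (case_specs : List (String × List (String × String))) (threshold_profiles : List (String × Int)) (out : List (String × List String)) : Prop := out = validate_threshold_profile_registry_alt case_specs threshold_profiles
instance (case_specs : List (String × List (String × String))) (threshold_profiles : List (String × Int)) (out : List (String × List String)) : Decidable (Spec_validate_threshold_profile_registry case_specs threshold_profiles out) := by unfold Spec_validate_threshold_profile_registry; infer_instance

-- ===== CLAIM (what is proved, stated in full; the proofs are below) =====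
def Claim_equal_validate_threshold_profile_registry : Prop := ∀ (case_specs : List (String × List (String × String))) (threshold_profiles : List (String × Int)), Dom_validate_threshold_profile_registry case_specs threshold_profiles → Spec_validate_threshold_profile_registry case_specs threshold_profiles (validate_threshold_profile_registry case_specs threshold_profiles)

-- ===== LEMMAS AND PROOFS =====

-- spec.get('threshold_profile') as a truthy value (none when absent or empty)
def pvProfB (spec : List (String × String)) : Option String :=
  match PySem.Dict.get? (PySem.Dict.mk spec) "threshold_profile" with
  | some p => if p ≠ "" then some p else none
  | none => none

-- the (profile, case) pairs of cases with a truthy profile, in case order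
def pvPairs (case_specs : List (String × List (String × String))) : List (String × String) :=
  case_specs.filterMap (fun cs => (pvProfB cs.2).map (fun p => (p, cs.1)))

-- the mismatch predicate on a (profile, case) pair, as A tests it
def pvQmm (threshold_profiles : List (String × Int)) (p : String × String) : Bool :=
  PySem.Dict.contains (PySem.Dict.mk threshold_profiles) p.1
    && (pvExpPrefixB p.2 ≠ "" && !(PySem.Str.startswith p.1 (pvExpPrefixB p.2)))

-- the two prefix helpers agree
theorem expPrefix_eq (c : String) : expected_profile_prefix_for_case c = pvExpPrefixB c := by
  simp only [expected_profile_prefix_for_case, pvRulesA, pvEpLoopA, pvExpPrefixB, List.find?]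
  split_ifs <;> simp_all

-- A's loop, started anywhere, appends the pair-level characterisations
theorem foldA_eq (tp : List (String × Int)) (l : List (String × List (String × String)))
    (r m s : List String) :
    l.foldl (pvStepA tp) (r, m, s)
      = (r ++ (pvPairs l).map Prod.fst,
         m ++ (((pvPairs l).filter (fun p => !(PySem.Dict.contains (PySem.Dict.mk tp) p.1))).map Prod.snd),
         s ++ (((pvPairs l).filter (pvQmm tp)).map Prod.snd)) := by
  induction l generalizing r m s with
  | nil => simp [pvPairs]
  | cons hd tl ih =>
    rw [List.foldl_cons]
    cases hget : PySem.Dict.get? (PySem.Dict.mk hd.2) "threshold_profile" with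
    | none =>
      have hprof : pvProfB hd.2 = none := by simp [pvProfB, hget]
      have hpp : pvPairs (hd :: tl) = pvPairs tl := by
        simp [pvPairs, hprof]
      have hstep : pvStepA tp (r, m, s) hd = (r, m, s) := by simp [pvStepA, hget]
      rw [hstep, ih r m s, hpp]
    | some p =>
      by_cases hp0 : p = ""
      · have hprof : pvProfB hd.2 = none := by simp [pvProfB, hget, hp0]
        have hpp : pvPairs (hd :: tl) = pvPairs tl := by
          simp [pvPairs, hprof]
        have hstep : pvStepA tp (r, m, s) hd = (r, m, s) := by simp [pvStepA, hget, hp0]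
        rw [hstep, ih r m s, hpp]
      · have hprof : pvProfB hd.2 = some p := by simp [pvProfB, hget, hp0]
        have hpp : pvPairs (hd :: tl) = (p, hd.1) :: pvPairs tl := by
          simp [pvPairs, hprof]
        cases hc : PySem.Dict.contains (PySem.Dict.mk tp) p with
        | false =>
          have hstep : pvStepA tp (r, m, s) hd = (r ++ [p], m ++ [hd.1], s) := by
            simp only [pvStepA, hget, if_neg hp0, hc, Bool.not_false, if_true]
          have hq : pvQmm tp (p, hd.1) = false := by simp [pvQmm, hc]
          rw [hstep, ih (r ++ [p]) (m ++ [hd.1]) s, hpp]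
          simp only [PySem.Dict.contains_mk] at hc
          simp [hc, hq, List.append_assoc]
        | true =>
          cases hb : (decide (pvExpPrefixB hd.1 ≠ "") && !(PySem.Str.startswith p (pvExpPrefixB hd.1))) with
          | true =>
            have hstep : pvStepA tp (r, m, s) hd = (r ++ [p], m, s ++ [hd.1]) := by
              simp only [pvStepA, hget, if_neg hp0, hc, Bool.not_true, Bool.false_eq_true,
                if_false, expPrefix_eq, hb, if_true]
            have hq : pvQmm tp (p, hd.1) = true := by simp only [pvQmm, hc, Bool.true_and]; exact hb
            rw [hstep, ih (r ++ [p]) m (s ++ [hd.1]), hpp]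
            simp only [PySem.Dict.contains_mk] at hc
            simp [hc, hq, List.append_assoc]
          | false =>
            have hstep : pvStepA tp (r, m, s) hd = (r ++ [p], m, s) := by
              simp only [pvStepA, hget, if_neg hp0, hc, Bool.not_true, Bool.false_eq_true,
                if_false, expPrefix_eq, hb]
            have hq : pvQmm tp (p, hd.1) = false := by simp only [pvQmm, hc, Bool.true_and]; exact hb
            rw [hstep, ih (r ++ [p]) m s, hpp]
            simp only [PySem.Dict.contains_mk] at hc
            simp [hc, hq, List.append_assoc]

-- the grouping loop is the pair-level modify loop
theorem groupB_eq (l : List (String × List (String × String))) (d : PySem.Dict String (List String)) :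
    l.foldl pvGroupStepB d = (pvPairs l).foldl (fun d p => d.modify p.1 [] (fun v => v ++ [p.2])) d := by
  induction l generalizing d with
  | nil => simp [pvPairs]
  | cons hd tl ih =>
    rw [List.foldl_cons]
    cases hget : PySem.Dict.get? (PySem.Dict.mk hd.2) "threshold_profile" with
    | none =>
      have hprof : pvProfB hd.2 = none := by simp [pvProfB, hget]
      have hpp : pvPairs (hd :: tl) = pvPairs tl := by
        simp [pvPairs, hprof]
      have hstep : pvGroupStepB d hd = d := by simp [pvGroupStepB, hget]
      rw [hstep, ih d, hpp]
    | some p =>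
      by_cases hp0 : p = ""
      · have hprof : pvProfB hd.2 = none := by simp [pvProfB, hget, hp0]
        have hpp : pvPairs (hd :: tl) = pvPairs tl := by
          simp [pvPairs, hprof]
        have hstep : pvGroupStepB d hd = d := by simp [pvGroupStepB, hget, hp0]
        rw [hstep, ih d, hpp]
      · have hprof : pvProfB hd.2 = some p := by simp [pvProfB, hget, hp0]
        have hpp : pvPairs (hd :: tl) = (p, hd.1) :: pvPairs tl := by
          simp [pvPairs, hprof]
        have hstep : pvGroupStepB d hd = d.modify p [] (fun v => v ++ [hd.1]) := by
          simp [pvGroupStepB, hget, hp0]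
        rw [hstep, ih _, hpp, List.foldl_cons]

-- the judging loop appends two flatMaps over the items
theorem foldJudge_eq (tp : List (String × Int)) (its : List (String × List String))
    (m s : List String) :
    its.foldl (pvJudgeStepB tp) (m, s)
      = (m ++ its.flatMap (fun it => if !(PySem.Dict.contains (PySem.Dict.mk tp) it.1) then it.2 else []),
         s ++ its.flatMap (fun it => if PySem.Dict.contains (PySem.Dict.mk tp) it.1 then
             it.2.filter (fun c => pvExpPrefixB c ≠ "" && !(PySem.Str.startswith it.1 (pvExpPrefixB c))) else [])) := by
  induction its generalizing m s with
  | nil => simp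
  | cons hd tl ih =>
    rw [List.foldl_cons]
    cases hc : PySem.Dict.contains (PySem.Dict.mk tp) hd.1 with
    | false =>
      have hstep : pvJudgeStepB tp (m, s) hd = (m ++ hd.2, s) := by
        simp [pvJudgeStepB, hc]
      rw [hstep, ih (m ++ hd.2) s]
      simp only [PySem.Dict.contains_mk] at hc
      simp [hc, List.append_assoc]
    | true =>
      have hstep : pvJudgeStepB tp (m, s) hd
          = (m, s ++ hd.2.filter (fun c =>
              pvExpPrefixB c ≠ "" && !(PySem.Str.startswith hd.1 (pvExpPrefixB c)))) := by
        simp [pvJudgeStepB, hc]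
      rw [hstep, ih m _]
      simp only [PySem.Dict.contains_mk] at hc
      simp [hc, List.append_assoc]

-- count of an element in a flatMap
theorem count_flatMap' {α β : Type} [BEq β] (l : List α) (f : α → List β) (a : β) :
    (l.flatMap f).count a = (l.map (fun x => (f x).count a)).sum := by
  induction l with
  | nil => simp
  | cons hd tl ih => simp [List.count_append, ih]

-- sum of a one-hot map over a Nodup list
theorem sum_ite_nodup {α : Type} [DecidableEq α] (keys : List α) (h : keys.Nodup) (x : α) (c : Nat) :
    (keys.map (fun k => if x = k then c else 0)).sum = if x ∈ keys then c else 0 := by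
  induction keys with
  | nil => simp
  | cons hd tl ih =>
    simp only [List.nodup_cons] at h
    by_cases hx : x = hd
    · subst hx; simp [h.1, ih h.2]
    · simp [hx, ih h.2, List.mem_cons]

-- count of a pair in a fiber of the grouping
theorem count_filter_fiber {β : Type} [DecidableEq β] (ps : List (String × β)) (k : String) (a : String × β) :
    (ps.filter (fun p => p.1 == k)).count a = if a.1 = k then ps.count a else 0 := by
  by_cases h : a.1 = k
  · rw [if_pos h, List.count_filter]
    simpa using h
  · rw [if_neg h, List.count_eq_zero]
    intro hmem
    rw [List.mem_filter] at hmem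
    exact h (by simpa using hmem.2)

-- flattening the fibers over the distinct keys is a permutation of the pair list
theorem flatMap_fibers_perm {β : Type} [DecidableEq β] (ps : List (String × β)) :
    ((PySem.Set.ofList (ps.map Prod.fst)).flatMap
        (fun k => ps.filter (fun p => p.1 == k))).Perm ps := by
  rw [List.perm_iff_count]
  intro a
  rw [count_flatMap']
  have : ((PySem.Set.ofList (ps.map Prod.fst)).map
        (fun k => (ps.filter (fun p => p.1 == k)).count a))
      = ((PySem.Set.ofList (ps.map Prod.fst)).map (fun k => if a.1 = k then ps.count a else 0)) := by
    simp only [count_filter_fiber]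
  rw [this, sum_ite_nodup _ (PySem.Set.nodup_ofList _)]
  by_cases hmem : a ∈ ps
  · rw [if_pos]
    rw [PySem.Set.mem_ofList]
    exact List.mem_map_of_mem hmem
  · rw [List.count_eq_zero.mpr hmem]; simp

-- a guarded whole fiber is the fiber filtered by the key predicate
theorem fiber_if {γ : Type} (ps : List (String × γ)) (k : String) (C : String → Bool) :
    (if C k then (ps.filter (fun p => p.1 == k)).map Prod.snd else [])
      = ((ps.filter (fun p => p.1 == k)).filter (fun p => C p.1)).map Prod.snd := by
  have hmem : ∀ p ∈ ps.filter (fun p => p.1 == k), p.1 = k := by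
    intro p hp; simpa using (List.mem_filter.mp hp).2
  cases hC : C k with
  | true =>
    have hfe : (ps.filter (fun p => p.1 == k)).filter (fun p => C p.1)
        = ps.filter (fun p => p.1 == k) :=
      List.filter_eq_self.mpr (fun p hp => by rw [hmem p hp, hC])
    rw [if_pos rfl, hfe]
  | false =>
    have hfe : (ps.filter (fun p => p.1 == k)).filter (fun p => C p.1) = [] :=
      List.filter_eq_nil_iff.mpr (fun p hp => by rw [hmem p hp, hC]; simp)
    rw [if_neg (by simp), hfe, List.map_nil]

-- a guarded, per-element-filtered fiber is the fiber filtered by the pair predicate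
theorem fiber_if_filter {γ : Type} (ps : List (String × γ)) (k : String) (C : String → Bool)
    (g : String → γ → Bool) :
    (if C k then ((ps.filter (fun p => p.1 == k)).map Prod.snd).filter (fun c => g k c) else [])
      = ((ps.filter (fun p => p.1 == k)).filter (fun p => C p.1 && g p.1 p.2)).map Prod.snd := by
  have hmem : ∀ p ∈ ps.filter (fun p => p.1 == k), p.1 = k := by
    intro p hp; simpa using (List.mem_filter.mp hp).2
  cases hC : C k with
  | true =>
    rw [if_pos rfl, List.filter_map]
    congr 1
    apply List.filter_congr
    intro p hp
    simp [Function.comp, hmem p hp, hC]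
  | false =>
    have hfe : (ps.filter (fun p => p.1 == k)).filter (fun p => C p.1 && g p.1 p.2) = [] :=
      List.filter_eq_nil_iff.mpr (fun p hp => by rw [hmem p hp, hC]; simp)
    rw [if_neg (by simp), hfe, List.map_nil]

-- ===== VERDICT (by name: the statement is the Claim_ definition above) =====
theorem validate_threshold_profile_registry_spec : Claim_equal_validate_threshold_profile_registry := by
  intro cs tp _
  unfold Spec_validate_threshold_profile_registry
  simp only [validate_threshold_profile_registry, validate_threshold_profile_registry_alt]
  rw [foldA_eq tp cs [] [] [], groupB_eq cs PySem.Dict.empty]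
  set ps := pvPairs cs with hps
  set idx := ps.foldl (fun d p => d.modify p.1 [] (fun v => v ++ [p.2])) PySem.Dict.empty with hidx
  have hkeys : idx.keys = PySem.Set.ofList (ps.map Prod.fst) := by
    rw [hidx, PySem.Dict.keys_foldl_modify_key ps Prod.fst [] (fun _ p => (fun v => v ++ [p.2])),
      PySem.Dict.keys_empty, PySem.Set.update_nil_left]
  have hnodup : idx.keys.Nodup := by
    rw [hidx]
    exact PySem.Dict.nodup_keys_foldl_modify_key ps Prod.fst [] _ _ PySem.Dict.nodup_keys_empty
  have hgetD : ∀ k, idx.getD k [] = (ps.filter (fun p => p.1 == k)).map Prod.snd := by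
    intro k
    rw [hidx, PySem.Dict.getD_foldl_modify_append, PySem.Dict.getD_empty, List.nil_append]
  have hitems : idx.items = idx.keys.map (fun k => (k, idx.getD k [])) :=
    PySem.Dict.items_eq_map_keys idx hnodup []
  rw [foldJudge_eq tp idx.items [] []]
  have hperm : ((PySem.Set.ofList (ps.map Prod.fst)).flatMap
      (fun k => ps.filter (fun p => p.1 == k))).Perm ps := flatMap_fibers_perm ps
  -- missing
  have hmiss : idx.items.flatMap
        (fun it => if !(PySem.Dict.contains (PySem.Dict.mk tp) it.1) then it.2 else [])
      = ((idx.keys.flatMap (fun k => ps.filter (fun p => p.1 == k))).filter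
          (fun p => !(PySem.Dict.contains (PySem.Dict.mk tp) p.1))).map Prod.snd := by
    rw [hitems, List.flatMap_map, List.filter_flatMap, List.map_flatMap]
    congr 1
    funext k
    dsimp only
    rw [hgetD k]
    exact fiber_if ps k (fun k => !(PySem.Dict.contains (PySem.Dict.mk tp) k))
  -- mismatched
  have hmism : idx.items.flatMap
        (fun it => if PySem.Dict.contains (PySem.Dict.mk tp) it.1 then
            it.2.filter (fun c => pvExpPrefixB c ≠ "" && !(PySem.Str.startswith it.1 (pvExpPrefixB c))) else [])
      = ((idx.keys.flatMap (fun k => ps.filter (fun p => p.1 == k))).filter (pvQmm tp)).map Prod.snd := by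
    rw [hitems, List.flatMap_map, List.filter_flatMap, List.map_flatMap]
    congr 1
    funext k
    dsimp only
    rw [hgetD k]
    exact fiber_if_filter ps k (fun k => PySem.Dict.contains (PySem.Dict.mk tp) k)
        (fun k c => pvExpPrefixB c ≠ "" && !(PySem.Str.startswith k (pvExpPrefixB c)))
  -- the two sort keys are the identity, which is injective
  have hinj : Function.Injective (fun x : String => x) := fun _ _ h => h
  -- field 2: missing
  have h2 : PySem.List.sorted (idx.items.flatMap
        (fun it => if !(PySem.Dict.contains (PySem.Dict.mk tp) it.1) then it.2 else [])) (fun x => x) false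
      = PySem.List.sorted ((ps.filter (fun p => !(PySem.Dict.contains (PySem.Dict.mk tp) p.1))).map Prod.snd)
          (fun x => x) false := by
    rw [hmiss, hkeys]
    exact PySem.List.sorted_eq_sorted_of_perm _ _ _ hinj ((hperm.filter _).map Prod.snd)
  -- field 4: mismatched
  have h4 : PySem.List.sorted (idx.items.flatMap
        (fun it => if PySem.Dict.contains (PySem.Dict.mk tp) it.1 then
            it.2.filter (fun c => pvExpPrefixB c ≠ "" && !(PySem.Str.startswith it.1 (pvExpPrefixB c))) else []))
          (fun x => x) false
      = PySem.List.sorted (((ps.filter (pvQmm tp)).map Prod.snd)) (fun x => x) false := by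
    rw [hmism, hkeys]
    exact PySem.List.sorted_eq_sorted_of_perm _ _ _ hinj ((hperm.filter _).map Prod.snd)
  -- field 3: the two membership tests agree
  have h3 : (fun name => !(PySem.Set.contains (PySem.Set.ofList (ps.map Prod.fst)) name))
      = (fun p => !(idx.contains p)) := by
    funext n
    rw [PySem.Dict.contains_eq_decide_mem_keys, hkeys]
    simp [PySem.Set.contains_eq_listContains]
  simp only [List.nil_append, h2, h4, h3, hkeys]
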